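-- pv_equiv track=rewrite | github.com/par3k/Algorithm-Codingtest | BOJ_Python/1003.py | fibonacci_cnt
-- ===== SOURCE A (Python) =====
-- def fibonacci_cnt(n):
--     zero_cnt = [1, 0]
--     one_cnt = [0, 1]
--     if n <= 1:
--         return
--
--     for i in range(2, n + 1):
--         zero_cnt.append(zero_cnt[i - 1] + zero_cnt[i - 2])
--         one_cnt.append(one_cnt[i - 1] + one_cnt[i - 2])
--
--     return zero_cnt, one_cnt
-- ===== SOURCE B (Python) =====
-- def fibonacci_cnt(n):
--     if n <= 1:
--         return
--     # one_cnt is exactly the Fibonacci sequence F(0..n); zero_cnt is it shifted: [1] + F(0..n-1)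
--     F = [0, 1]
--     for _ in range(n - 1):
--         F.append(F[-1] + F[-2])
--     return [1] + F[:-1], F
-- ===== Notes on version B (the rewrite author's own statement) =====
-- stated objective: simpler
-- what changed: B runs a single Fibonacci loop and derives the zero-count list from it by a shift/slice ([1] + F[:-1]) instead of maintaining two parallel index-addressed recurrence lists.
import Mathlib
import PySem

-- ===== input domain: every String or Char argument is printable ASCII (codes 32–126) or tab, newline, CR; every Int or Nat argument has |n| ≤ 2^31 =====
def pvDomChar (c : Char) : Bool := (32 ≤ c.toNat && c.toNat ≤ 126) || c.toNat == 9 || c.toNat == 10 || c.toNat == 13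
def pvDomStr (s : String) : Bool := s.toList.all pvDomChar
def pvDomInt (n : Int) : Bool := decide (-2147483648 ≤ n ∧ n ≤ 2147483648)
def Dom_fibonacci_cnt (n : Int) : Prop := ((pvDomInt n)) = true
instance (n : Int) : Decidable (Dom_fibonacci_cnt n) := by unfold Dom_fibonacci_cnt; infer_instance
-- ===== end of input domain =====

-- B builds one Fibonacci list and derives the zero-count list by a shift/slice, instead of
-- A's two parallel index-addressed recurrence lists; same values, same None for n <= 1.

-- ===== PORT A =====
-- indices i-1, i-2 are always in range inside the loop, so pyGetD with default 0 is exact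
def fibonacci_cnt (n : Int) : Option (List Int × List Int) :=
  let zero_cnt : List Int := [1, 0]
  let one_cnt : List Int := [0, 1]
  if n ≤ 1 then none
  else
    let s := (PySem.List.pyRange 2 (n + 1) 1).foldl
      (fun (s : List Int × List Int) i =>
        (s.1 ++ [PySem.List.pyGetD s.1 (i - 1) 0 + PySem.List.pyGetD s.1 (i - 2) 0],
         s.2 ++ [PySem.List.pyGetD s.2 (i - 1) 0 + PySem.List.pyGetD s.2 (i - 2) 0]))
      (zero_cnt, one_cnt)
    some (s.1, s.2)

-- ===== PORT B =====
-- F[-1], F[-2] are always in range (F starts with two elements), so pyGetD with default 0 is exact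
def fibonacci_cnt_alt (n : Int) : Option (List Int × List Int) :=
  if n ≤ 1 then none
  else
    let F := (PySem.List.pyRange 0 (n - 1) 1).foldl
      (fun (F : List Int) _ =>
        F ++ [PySem.List.pyGetD F (-1) 0 + PySem.List.pyGetD F (-2) 0])
      [0, 1]
    some (1 :: F.dropLast, F)

-- ===== PRECONDITION & SPEC =====
def Spec_fibonacci_cnt (n : Int) (out : Option (List Int × List Int)) : Prop := out = fibonacci_cnt_alt n
instance (n : Int) (out : Option (List Int × List Int)) : Decidable (Spec_fibonacci_cnt n out) := by unfold Spec_fibonacci_cnt; infer_instance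

-- ===== CLAIM (what is proved, stated in full; the proofs are below) =====
def Claim_equal_fibonacci_cnt : Prop := ∀ (n : Int), Dom_fibonacci_cnt n → Spec_fibonacci_cnt n (fibonacci_cnt n)

-- ===== LEMMAS AND PROOFS =====

def fibP : Nat → Int
  | 0 => 0
  | 1 => 1
  | (k + 2) => fibP k + fibP (k + 1)

def zfP (i : Nat) : Int := if i = 0 then 1 else fibP (i - 1)

lemma zf_step (k : Nat) : zfP (k + 1) + zfP k = fibP (k + 1) := by
  cases k with
  | zero => simp [zfP, fibP]
  | succ m => rw [zfP, zfP, fibP]; simp; ring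

-- B's loop produces the Fibonacci prefix
lemma b_loop (k : Nat) :
    (PySem.List.pyRange 0 (k : Int) 1).foldl
      (fun (F : List Int) _ =>
        F ++ [PySem.List.pyGetD F (-1) 0 + PySem.List.pyGetD F (-2) 0])
      [0, 1]
    = (List.range (k + 2)).map fibP := by
  induction k with
  | zero =>
    simp [List.range_succ]
    decide
  | succ m ih =>
    have h : (((m : Nat) + 1 : Nat) : Int) = (m : Int) + 1 := by push_cast; ring
    rw [h, PySem.List.pyRange_one_succ_right (by positivity), List.foldl_append, ih]
    have hne : ((List.range (m + 2)).map fibP) ≠ [] := by simp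
    have hlen : ((List.range (m + 2)).map fibP).length = m + 2 := by simp
    rw [List.foldl]
    rw [show ((-2 : Int)) = -((2 : Nat) : Int) by norm_num,
        PySem.List.pyGetD_neg_natCast _ _ _ (by omega) (by omega)]
    rw [show ((-1 : Int)) = -((1 : Nat) : Int) by norm_num,
        PySem.List.pyGetD_neg_natCast _ _ _ (by omega) (by omega)]
    rw [List.foldl]
    simp only [hlen]
    have h1 : ((List.range (m + 2)).map fibP)[m + 2 - 1] = fibP (m + 1) := by
      simp [List.getElem_map, List.getElem_range]
    have h2 : ((List.range (m + 2)).map fibP)[m + 2 - 2] = fibP m := by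
      simp [List.getElem_map, List.getElem_range]
    rw [h1, h2]
    have hf : fibP (m + 1) + fibP m = fibP (m + 2) := by rw [fibP]; ring
    rw [hf]
    simp [List.range_succ]

-- A's loop produces the shifted and unshifted Fibonacci prefixes
lemma a_loop (k : Nat) :
    (PySem.List.pyRange 2 (2 + (k : Int)) 1).foldl
      (fun (s : List Int × List Int) i =>
        (s.1 ++ [PySem.List.pyGetD s.1 (i - 1) 0 + PySem.List.pyGetD s.1 (i - 2) 0],
         s.2 ++ [PySem.List.pyGetD s.2 (i - 1) 0 + PySem.List.pyGetD s.2 (i - 2) 0]))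
      ([1, 0], [0, 1])
    = ((List.range (k + 2)).map zfP, (List.range (k + 2)).map fibP) := by
  induction k with
  | zero =>
    rw [show (2 + ((0 : Nat) : Int)) = 2 by norm_num, PySem.List.pyRange_one_eq_nil (by norm_num)]
    simp [List.range_succ, zfP, fibP]
  | succ m ih =>
    have h : (2 + (((m : Nat) + 1 : Nat) : Int)) = (2 + (m : Int)) + 1 := by push_cast; ring
    rw [h, PySem.List.pyRange_one_succ_right (by omega), List.foldl_append, ih, List.foldl]
    have e1 : (2 + (m : Int)) - 1 = ((m + 1 : Nat) : Int) := by push_cast; ring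
    have e2 : (2 + (m : Int)) - 2 = ((m : Nat) : Int) := by ring
    rw [e1, e2, List.foldl]
    simp only [PySem.List.pyGetD_natCast]
    have g1 : ∀ (f : Nat → Int), ((List.range (m + 2)).map f).getD (m + 1) 0 = f (m + 1) := by
      intro f
      rw [List.getD_eq_getElem _ _ (by simp)]
      simp [List.getElem_map, List.getElem_range]
    have g2 : ∀ (f : Nat → Int), ((List.range (m + 2)).map f).getD m 0 = f m := by
      intro f
      rw [List.getD_eq_getElem _ _ (by simp)]
      simp [List.getElem_map, List.getElem_range]
    rw [g1 zfP, g2 zfP, g1 fibP, g2 fibP]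
    have hz : zfP (m + 1) + zfP m = zfP (m + 2) := by
      rw [zf_step]; simp [zfP]
    have hf : fibP (m + 1) + fibP m = fibP (m + 2) := by rw [fibP]; ring
    rw [hz, hf]
    simp [List.range_succ]

-- the shift: zero list = 1 :: (fib list).dropLast
lemma shift_eq (k : Nat) :
    (List.range (k + 2)).map zfP
      = 1 :: ((List.range (k + 2)).map fibP).dropLast := by
  have h2 : ((List.range (k + 2)).map fibP).dropLast = (List.range (k + 1)).map fibP := by
    rw [show k + 2 = (k + 1) + 1 from rfl, List.range_succ]
    simp
  rw [h2]
  simp [List.range_succ_eq_map, zfP, List.map_map, Function.comp_def]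

theorem fibonacci_cnt_spec : Claim_equal_fibonacci_cnt := by
  intro n _
  unfold Spec_fibonacci_cnt fibonacci_cnt fibonacci_cnt_alt
  by_cases h : n ≤ 1
  · simp [h]
  · simp only [h, if_false]
    have hk : 0 ≤ n - 1 := by omega
    set k : Nat := (n - 1).toNat with hkdef
    have hk1 : (n - 1 : Int) = (k : Int) := by omega
    have hk2 : (n + 1 : Int) = 2 + ((k : Int)) := by omega
    rw [hk1, hk2, a_loop, b_loop, shift_eq]
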